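-- pv_equiv track=rewrite | github.com/CaptrainWalrus/CaptrainWalrus.github.io | src/processing/direct_openai_generator.py | extract_key_entries
-- ===== SOURCE A (Python) =====
-- def extract_key_entries(session_content):
--     """Extract only the key development entries from session log"""
--     lines = session_content.split('\n')
--     entries = []
--
--     for line in lines:
--         # Look for timestamp entries that contain actual development work
--         if '## 2025-' in line and any(keyword in line.lower() for keyword in [
--             'fixed', 'implemented', 'added', 'created', 'updated', 'completed',
--             'revolutionary', 'breakthrough', 'critical', 'major', 'success']):
--             entries.append(line)
--         # Also grab a few lines after each timestamp for context
--         elif entries and len(entries) < 100:  # Limit to prevent too much text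
--             if line.strip() and not line.startswith('#'):
--                 entries.append(line)
--
--     return '\n'.join(entries[:20])  # Take first 20 most relevant entries
-- ===== SOURCE B (Python) =====
-- KEYWORDS = ['fixed', 'implemented', 'added', 'created', 'updated', 'completed',
--             'revolutionary', 'breakthrough', 'critical', 'major', 'success']
--
-- def _is_entry(line):
--     return '## 2025-' in line and any(k in line.lower() for k in KEYWORDS)
--
-- def extract_key_entries(session_content):
--     """Locate the first key entry, then filter the remaining lines in one pass."""
--     lines = session_content.split('\n')
--     for i, line in enumerate(lines):
--         if _is_entry(line):
--             kept = [line] + [l for l in lines[i + 1:]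
--                              if _is_entry(l) or (l.strip() and not l.startswith('#'))]
--             return '\n'.join(kept[:20])
--     return ''
-- ===== Notes on version B (the rewrite author's own statement) =====
-- stated objective: alternative
-- what changed: Replaces the stateful single loop (the 'entries already non-empty' flag and the dead len<100 cap) with an explicit locate-the-first-matching-line phase followed by a stateless filter over the remaining lines.
import Mathlib
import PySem

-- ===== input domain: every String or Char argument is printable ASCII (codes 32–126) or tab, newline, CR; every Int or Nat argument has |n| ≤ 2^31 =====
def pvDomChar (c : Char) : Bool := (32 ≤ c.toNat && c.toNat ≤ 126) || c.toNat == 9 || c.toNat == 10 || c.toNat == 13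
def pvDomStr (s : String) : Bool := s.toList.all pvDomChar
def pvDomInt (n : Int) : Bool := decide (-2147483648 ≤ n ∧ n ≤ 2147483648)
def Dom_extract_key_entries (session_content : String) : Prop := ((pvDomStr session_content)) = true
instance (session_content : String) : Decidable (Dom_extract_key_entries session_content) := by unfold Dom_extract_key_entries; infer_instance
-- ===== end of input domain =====

-- B replaces A's stateful single loop by a locate-first-match phase then a stateless filter; objective: alternative decomposition (same cost).

-- ===== PORT A =====
def pvKeywords : List String :=
  ["fixed", "implemented", "added", "created", "updated", "completed",
   "revolutionary", "breakthrough", "critical", "major", "success"]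

-- one iteration of A's for-loop body over the accumulator `entries`
def pvStepA (entries : List String) (line : String) : List String :=
  if PySem.Str.isIn "## 2025-" line
      && pvKeywords.any (fun k => PySem.Str.isIn k (PySem.Str.lower line)) then
    entries ++ [line]
  else if !entries.isEmpty && decide (entries.length < 100) then
    if PySem.Str.strip line != "" && !PySem.Str.startswith line "#" then
      entries ++ [line]
    else entries
  else entries

def extract_key_entries (session_content : String) : String :=
  let lines := (PySem.Str.split? session_content "\n").getD []
  let entries := lines.foldl pvStepA []
  PySem.Str.join "\n" (entries.take 20)

-- ===== PORT B =====
def pvIsEntry (line : String) : Bool :=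
  PySem.Str.isIn "## 2025-" line
    && pvKeywords.any (fun k => PySem.Str.isIn k (PySem.Str.lower line))

def pvCtx (l : String) : Bool :=
  PySem.Str.strip l != "" && !PySem.Str.startswith l "#"

def pvKeep (l : String) : Bool := pvIsEntry l || pvCtx l

-- B's phase 1: walk to the first entry line; phase 2: filter the rest
def pvScanB : List String → String
  | [] => ""
  | l :: ls =>
    if pvIsEntry l then
      PySem.Str.join "\n" ((l :: ls.filter pvKeep).take 20)
    else pvScanB ls

def extract_key_entries_alt (session_content : String) : String :=
  pvScanB ((PySem.Str.split? session_content "\n").getD [])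

-- ===== PRECONDITION & SPEC =====
def Spec_extract_key_entries (session_content : String) (out : String) : Prop := out = extract_key_entries_alt session_content
instance (session_content : String) (out : String) : Decidable (Spec_extract_key_entries session_content out) := by unfold Spec_extract_key_entries; infer_instance

-- ===== CLAIM (what is proved, stated in full; the proofs are below) =====
def Claim_equal_extract_key_entries : Prop := ∀ (session_content : String), Dom_extract_key_entries session_content → Spec_extract_key_entries session_content (extract_key_entries session_content)

-- ===== LEMMAS AND PROOFS =====

-- A's step, phrased through B's predicates (the conditions are the same Boolean terms)
theorem pvStepA_eq (entries : List String) (line : String) :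
    pvStepA entries line =
      if pvIsEntry line then entries ++ [line]
      else if !entries.isEmpty && decide (entries.length < 100) then
        if pvCtx line then entries ++ [line] else entries
      else entries := rfl

-- A's loop only ever appends to `entries`
theorem pvFoldA_prefix (ls : List String) (acc : List String) :
    ∃ t, ls.foldl pvStepA acc = acc ++ t := by
  induction ls generalizing acc with
  | nil => exact ⟨[], by simp⟩
  | cons l ls ih =>
    simp only [List.foldl_cons, pvStepA_eq]
    by_cases hm : pvIsEntry l
    · obtain ⟨t, ht⟩ := ih (acc ++ [l])
      exact ⟨l :: t, by simp only [hm, if_true]; simpa using ht⟩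
    · simp only [hm, Bool.false_eq_true, if_false]
      by_cases hg : (!acc.isEmpty && decide (acc.length < 100)) = true
      · simp only [hg, if_true]
        by_cases hc : pvCtx l
        · obtain ⟨t, ht⟩ := ih (acc ++ [l])
          exact ⟨l :: t, by simp only [hc, if_true]; simpa using ht⟩
        · simp only [hc, Bool.false_eq_true, if_false]; exact ih acc
      · simp only [hg, Bool.false_eq_true, if_false]; exact ih acc

-- once started (acc ≠ []), A's loop agrees with B's filter up to the first 20 kept lines
theorem pvFoldA_filter (ls : List String) (acc : List String) (hne : acc ≠ []) :
    (ls.foldl pvStepA acc).take 20 = (acc ++ ls.filter pvKeep).take 20 := by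
  induction ls generalizing acc with
  | nil => simp
  | cons l ls ih =>
    by_cases h20 : 20 ≤ acc.length
    · -- the first 20 entries are already fixed: both sides reduce to acc.take 20
      obtain ⟨t, ht⟩ := pvFoldA_prefix (l :: ls) acc
      rw [ht, List.take_append_of_le_length h20, List.take_append_of_le_length h20]
    · have h20' : acc.length < 20 := by omega
      have hguard : (!acc.isEmpty && decide (acc.length < 100)) = true := by
        simp [hne]; omega
      simp only [List.foldl_cons, List.filter_cons, pvStepA_eq]
      by_cases hm : pvIsEntry l
      · have hk : pvKeep l = true := by simp [pvKeep, hm]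
        simp only [hm, if_true, hk]
        rw [ih (acc ++ [l]) (by simp)]
        simp
      · simp only [hm, Bool.false_eq_true, if_false, hguard, if_true]
        by_cases hc : pvCtx l
        · have hk : pvKeep l = true := by simp [pvKeep, hc]
          simp only [hc, if_true, hk]
          rw [ih (acc ++ [l]) (by simp)]
          simp
        · have hk : pvKeep l = false := by
            simp only [pvKeep, Bool.or_eq_false_iff]
            exact ⟨by simpa using hm, by simpa using hc⟩
          simp only [hc, Bool.false_eq_true, if_false, hk]
          exact ih acc hne

-- before the first matching line A's loop keeps entries = [], matching B's phase 1
theorem pvMain (ls : List String) :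
    PySem.Str.join "\n" ((ls.foldl pvStepA []).take 20) = pvScanB ls := by
  induction ls with
  | nil => rfl
  | cons l ls ih =>
    simp only [List.foldl_cons, pvScanB, pvStepA_eq]
    by_cases hm : pvIsEntry l
    · simp only [hm, if_true]
      rw [show ([] : List String) ++ [l] = [l] from rfl,
          pvFoldA_filter ls [l] (by simp)]
      simp
    · simp only [hm, Bool.false_eq_true, if_false, List.isEmpty_nil]
      simpa using ih

-- ===== VERDICT (by name: the statement is the Claim_ definition above) =====
theorem extract_key_entries_spec : Claim_equal_extract_key_entries := by
  intro s _
  unfold Spec_extract_key_entries extract_key_entries extract_key_entries_alt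
  exact pvMain _
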